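-- pv_equiv track=rewrite | github.com/trongtai37/gen-6 | homework/thinhbka/lesson-8-shortest_path_union_find/Rakuten_Codility.py | solution
-- ===== SOURCE A (Python) =====
-- def solution(T=[]): #Return the length summer
--     maxLeft = [T[0]]
--     for i in range(1,len(T)):
--         maxLeft.append(max(maxLeft[-1],T[i]))
--     minRight,minRight[-1] = [0]*len(T),T[-1]
--     for i in range(len(T)-2,-1,-1):
--         minRight[i] = min(minRight[i+1],T[i])
--
--     for i in range(len(T)-1):
--         if maxLeft[i] < minRight[i+1]:
--             return i
-- ===== SOURCE B (Python) =====
-- def solution(T=[]):  # one-pass partition-boundary algorithm: no suffix-min array at all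
--     # b = smallest index such that every later element strictly exceeds max(T[0..b]):
--     # whenever T[j] fails to exceed the max before the current boundary, the boundary
--     # must move to j; runM tracks the overall running max to become the new boundary max.
--     b = 0
--     curMax = T[0]
--     runM = T[0]
--     for j in range(1, len(T)):
--         runM = max(runM, T[j])
--         if T[j] <= curMax:
--             b = j
--             curMax = runM
--     if b < len(T) - 1:
--         return b
-- ===== Notes on version B (the rewrite author's own statement) =====
-- stated objective: faster
-- what changed: A makes three passes and allocates two auxiliary arrays (prefix-max array, suffix-min array, then a scan comparing them); B uses the one-pass partition-boundary algorithm: a single forward loop over three scalars that moves a candidate boundary to j whenever T[j] fails to exceed the max of the left part, with no auxiliary array at all.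
import Mathlib
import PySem

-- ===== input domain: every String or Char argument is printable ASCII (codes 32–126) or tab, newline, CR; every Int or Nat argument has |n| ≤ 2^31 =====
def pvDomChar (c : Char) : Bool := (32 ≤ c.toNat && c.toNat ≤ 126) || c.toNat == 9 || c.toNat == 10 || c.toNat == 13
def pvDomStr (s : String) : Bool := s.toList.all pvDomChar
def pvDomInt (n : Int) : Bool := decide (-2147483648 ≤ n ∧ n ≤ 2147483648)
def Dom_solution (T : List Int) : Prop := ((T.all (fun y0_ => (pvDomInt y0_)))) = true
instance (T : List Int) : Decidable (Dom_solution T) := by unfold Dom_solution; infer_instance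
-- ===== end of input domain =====

-- A builds a prefix-max array and a suffix-min array and scans them; B is the one-pass
-- partition-boundary algorithm keeping three scalars and no array. Return values proved equal
-- on nonempty lists (A raises IndexError on []).

-- ===== PORT A =====
-- the body of A's first loop: maxLeft.append(max(maxLeft[-1], T[i]))
def mlStep (T : List Int) (acc : List Int) (i : Int) : List Int :=
  acc ++ [max (PySem.List.pyGetD acc (-1) 0) (PySem.List.pyGetD T i 0)]

-- A's backward pass: minRight = [0]*len(T); minRight[-1] = T[-1];
-- for i in range(len(T)-2,-1,-1): minRight[i] = min(minRight[i+1], T[i])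
def mrStep (T : List Int) (mr : List Int) (i : Int) : List Int :=
  PySem.List.pySetD mr i (min (PySem.List.pyGetD mr (i + 1) 0) (PySem.List.pyGetD T i 0))

def buildMinRight (T : List Int) : List Int :=
  (PySem.List.pyRange ((T.length : Int) - 2) (-1) (-1)).foldl (mrStep T)
    (PySem.List.pySetD (List.replicate T.length 0) (-1) (PySem.List.pyGetD T (-1) 0))

def solution (T : List Int) : Option Int :=
  let maxLeft := (PySem.List.pyRange 1 (T.length : Int) 1).foldl (mlStep T) [PySem.List.pyGetD T 0 0]
  let minRight := buildMinRight T
  (PySem.List.pyRange 0 ((T.length : Int) - 1) 1).find?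
    (fun i => decide (PySem.List.pyGetD maxLeft i 0 < PySem.List.pyGetD minRight (i + 1) 0))

-- ===== PORT B =====
-- B's single pass: state (b, curMax, runM); runM = max(runM, T[j]); if T[j] <= curMax: b, curMax = j, runM
def stepB (T : List Int) (s : Int × Int × Int) (j : Int) : Int × Int × Int :=
  let runM := max s.2.2 (PySem.List.pyGetD T j 0)
  if PySem.List.pyGetD T j 0 ≤ s.2.1 then (j, runM, runM) else (s.1, s.2.1, runM)

def solution_alt (T : List Int) : Option Int :=
  let x := PySem.List.pyGetD T 0 0
  let s := (PySem.List.pyRange 1 (T.length : Int) 1).foldl (stepB T) (0, x, x)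
  if s.1 < (T.length : Int) - 1 then some s.1 else none

-- ===== PRECONDITION & SPEC =====
-- A (and B) raise IndexError on the empty list (T[0] / T[-1]); nothing else is excluded.
def Pre_solution (T : List Int) : Prop := T ≠ []
instance (T : List Int) : Decidable (Pre_solution T) := by unfold Pre_solution; infer_instance
def pvWitness_solution : List Int := [1, 2]

def Spec_solution (T : List Int) (out : Option Int) : Prop := out = solution_alt T
instance (T : List Int) (out : Option Int) : Decidable (Spec_solution T out) := by unfold Spec_solution; infer_instance

-- ===== CLAIM (what is proved, stated in full; the proofs are below) =====
def Claim_equal_solution : Prop := ∀ (T : List Int), Dom_solution T → Pre_solution T → Spec_solution T (solution T)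

-- ===== LEMMAS AND PROOFS =====

-- max(T[0..j]), the value both programs' prefix maxima denote
def runMax (T : List Int) : Nat → Int
  | 0 => T.getD 0 0
  | j + 1 => max (runMax T j) (T.getD (j + 1) 0)

theorem runMax_mono (T : List Int) {i j : Nat} (h : i ≤ j) : runMax T i ≤ runMax T j := by
  induction j with
  | zero => simp_all
  | succ j ih =>
    rcases Nat.lt_or_ge i (j + 1) with hij | hij
    · exact le_trans (ih (by omega)) (le_max_left _ _)
    · have : i = j + 1 := by omega
      subst this; exact le_rfl

-- ---- A's prefix-max pass ----
def mlFold (T : List Int) (k : Int) : List Int :=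
  (PySem.List.pyRange 1 k 1).foldl (mlStep T) [PySem.List.pyGetD T 0 0]

theorem ml_char (T : List Int) : ∀ k : Nat,
    (mlFold T ((k : Int) + 1)).length = k + 1 ∧
    ∀ j : Nat, j ≤ k → (mlFold T ((k : Int) + 1)).getD j 0 = runMax T j := by
  intro k
  induction k with
  | zero =>
      refine ⟨?_, ?_⟩ <;>
        simp [mlFold, runMax, PySem.List.pyGetD_ofNat']
  | succ k ih =>
      obtain ⟨hl, hg⟩ := ih
      have hne : mlFold T ((k : Int) + 1) ≠ [] := by
        intro h; rw [h] at hl; simp at hl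
      have hcast : (((k + 1 : Nat)) : Int) + 1 = ((k : Int) + 1) + 1 := by push_cast; ring
      have hsplit : PySem.List.pyRange 1 (((k + 1 : Nat) : Int) + 1) 1
          = PySem.List.pyRange 1 ((k : Int) + 1) 1 ++ [(k : Int) + 1] := by
        rw [hcast]
        exact PySem.List.pyRange_one_succ_right (by omega)
      have hstep : mlFold T (((k + 1 : Nat) : Int) + 1)
          = mlFold T ((k : Int) + 1) ++ [max (PySem.List.pyGetD (mlFold T ((k : Int) + 1)) (-1) 0)
              (PySem.List.pyGetD T ((k : Int) + 1) 0)] := by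
        unfold mlFold
        rw [hsplit, List.foldl_append]
        rfl
      have hTidx : PySem.List.pyGetD T ((k : Int) + 1) 0 = T.getD (k + 1) 0 := by
        rw [show ((k : Int) + 1) = (((k + 1 : Nat)) : Int) by push_cast; ring,
          PySem.List.pyGetD_natCast]
      have hlast : PySem.List.pyGetD (mlFold T ((k : Int) + 1)) (-1) 0 = runMax T k := by
        rw [PySem.List.pyGetD_neg_one _ _ hne, List.getLast_eq_getElem,
          ← List.getD_eq_getElem _ 0 (by omega)]
        simp only [hl, Nat.add_sub_cancel]
        exact hg k le_rfl
      have hrm : mlFold T (((k + 1 : Nat)) + 1 : Int)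
          = mlFold T ((k : Int) + 1) ++ [runMax T (k + 1)] := by
        rw [hstep, hlast, hTidx]; rfl
      refine ⟨by rw [hrm]; simp [hl], ?_⟩
      intro j hj
      rw [hrm]
      rcases Nat.lt_or_ge j (k + 1) with hjk | hjk
      · rw [List.getD_append _ _ _ _ (by omega)]
        exact hg j (by omega)
      · have hj1 : j = k + 1 := by omega
        subst hj1
        rw [List.getD_append_right _ _ _ _ (by omega), hl]
        simp

theorem getD_set_ne (l : List Int) (a k : Nat) (v : Int) (h : a ≠ k) :
    (l.set a v).getD k 0 = l.getD k 0 := by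
  rw [List.getD_eq_getElem?_getD, List.getD_eq_getElem?_getD, List.getElem?_set_ne h]

-- ---- A's suffix-min pass: every entry k ≥ the loop cursor satisfies the "strictly below the
-- whole suffix" characterisation (only this iff, never the entry's value, is needed) ----
def MrInv (T mr : List Int) (lo : Nat) : Prop :=
  mr.length = T.length ∧
  ∀ k, lo ≤ k → k < T.length →
    ∀ x : Int, x < mr.getD k 0 ↔ ∀ j, k ≤ j → j < T.length → x < T.getD j 0

theorem mrStep_inv (T mr : List Int) (a : Nat) (ha : a + 1 < T.length)
    (h : MrInv T mr (a + 1)) : MrInv T (mrStep T mr (a : Int)) a := by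
  obtain ⟨hlen, hiff⟩ := h
  have han : a < mr.length := by omega
  have hset : mrStep T mr (a : Int)
      = mr.set a (min (mr.getD (a + 1) 0) (T.getD a 0)) := by
    unfold mrStep
    rw [show ((a : Int) + 1) = (((a + 1 : Nat)) : Int) by push_cast; ring,
      PySem.List.pyGetD_natCast, PySem.List.pyGetD_natCast, PySem.List.pySetD_natCast]
  constructor
  · rw [hset]; simp [hlen]
  · intro k hak hk x
    rcases Nat.lt_or_ge a k with hlt | hge
    · have hkk : (mr.set a (min (mr.getD (a + 1) 0) (T.getD a 0))).getD k 0 = mr.getD k 0 :=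
        getD_set_ne mr a k _ (by omega)
      rw [hset, hkk]
      exact hiff k (by omega) hk x
    · have hka : k = a := by omega
      subst hka
      have hkk : (mr.set k (min (mr.getD (k + 1) 0) (T.getD k 0))).getD k 0
          = min (mr.getD (k + 1) 0) (T.getD k 0) := by
        rw [List.getD_eq_getElem?_getD, List.getElem?_set_self (by simpa using han)]; rfl
      rw [hset, hkk, lt_min_iff, hiff (k + 1) le_rfl (by omega) x]
      constructor
      · rintro ⟨h1, h2⟩ j hkj hj
        rcases Nat.lt_or_ge k j with hj' | hj'
        · exact h1 j (by omega) hj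
        · have : j = k := by omega
          subst this; exact h2
      · intro hall
        exact ⟨fun j hj hj' => hall j (by omega) hj', hall k le_rfl (by omega)⟩

theorem mr_loop (T : List Int) : ∀ (a : Nat) (mr : List Int), a + 1 < T.length →
    MrInv T mr (a + 1) →
    MrInv T ((PySem.List.pyRange (a : Int) (-1) (-1)).foldl (mrStep T) mr) 0 := by
  intro a
  induction a with
  | zero =>
      intro mr ha hinv
      rw [PySem.List.pyRange_neg_one_cons (by omega),
        PySem.List.pyRange_neg_one_eq_nil (by omega)]
      simpa using mrStep_inv T mr 0 ha hinv
  | succ a ih =>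
      intro mr ha hinv
      rw [PySem.List.pyRange_neg_one_cons (by exact_mod_cast (by omega : (-1 : Int) < (a + 1 : Nat)))]
      have hstep := mrStep_inv T mr (a + 1) ha hinv
      have : ((a + 1 : Nat) : Int) - 1 = (a : Int) := by push_cast; ring
      rw [List.foldl_cons, this]
      exact ih (mrStep T mr ((a + 1 : Nat) : Int)) (by omega) hstep

theorem buildMinRight_inv (T : List Int) (hT : T ≠ []) : MrInv T (buildMinRight T) 0 := by
  have hn : 1 ≤ T.length := List.length_pos_iff.mpr hT
  have hinit : PySem.List.pySetD (List.replicate T.length 0) (-1) (PySem.List.pyGetD T (-1) 0)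
      = (List.replicate T.length 0).set (T.length - 1) (T.getD (T.length - 1) 0) := by
    rw [PySem.List.pyGetD_neg_one _ _ hT, List.getLast_eq_getElem,
      ← List.getD_eq_getElem _ 0 (by omega)]
    -- pySetD with index -1: unfold the primitive (no named lemma for a negative set index)
    simp [PySem.List.pySetD, PySem.List.pySet?, PySem.List.pyIdx?, hn,
      List.getD_eq_getElem?_getD]
  have hinitInv : MrInv T ((List.replicate T.length 0).set (T.length - 1)
      (T.getD (T.length - 1) 0)) (T.length - 1) := by
    constructor
    · simp
    · intro k hk hk' x
      have hkeq : k = T.length - 1 := by omega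
      subst hkeq
      have : ((List.replicate T.length 0).set (T.length - 1) (T.getD (T.length - 1) 0)).getD
          (T.length - 1) 0 = T.getD (T.length - 1) 0 := by
        rw [List.getD_eq_getElem _ _ (by simpa using (by omega : T.length - 1 < T.length)),
          List.getElem_set_self]
      rw [this]
      constructor
      · intro hx j h1 h2
        have : j = T.length - 1 := by omega
        subst this; exact hx
      · intro h; exact h _ le_rfl (by omega)
  rcases Nat.lt_or_ge T.length 2 with h1 | h2
  · -- n = 1 : the backward loop is empty
    have hn1 : T.length = 1 := by omega
    unfold buildMinRight
    rw [hinit, hn1]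
    rw [show ((1 : Nat) : Int) - 2 = (-1 : Int) by norm_num,
      PySem.List.pyRange_neg_one_eq_nil (by norm_num)]
    simpa [hn1] using hinitInv
  · -- n ≥ 2 : run the loop lemma from a = n - 2
    have hcast : (T.length : Int) - 2 = ((T.length - 2 : Nat) : Int) := by omega
    have := mr_loop T (T.length - 2)
      ((List.replicate T.length 0).set (T.length - 1) (T.getD (T.length - 1) 0))
      (by omega)
      (by rw [show T.length - 2 + 1 = T.length - 1 by omega]; exact hinitInv)
    unfold buildMinRight
    rw [hinit, hcast]
    exact this

-- ---- B's loop invariant ----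
def BInv (T : List Int) (k : Nat) (s : Int × Int × Int) : Prop :=
  0 ≤ s.1 ∧ s.1.toNat ≤ k ∧ k < T.length ∧
  s.2.1 = runMax T s.1.toNat ∧ s.2.2 = runMax T k ∧
  (∀ i : Nat, i < s.1.toNat → ∃ j : Nat, i < j ∧ j ≤ s.1.toNat ∧ T.getD j 0 ≤ runMax T i) ∧
  (∀ j : Nat, s.1.toNat < j → j ≤ k → runMax T s.1.toNat < T.getD j 0)

theorem B_loop (T : List Int) : ∀ (c k : Nat) (s : Int × Int × Int),
    k + 1 + c = T.length → BInv T k s →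
    BInv T (T.length - 1)
      ((PySem.List.pyRange ((k : Int) + 1) (T.length : Int) 1).foldl (stepB T) s) := by
  intro c
  induction c with
  | zero =>
      intro k s hc hinv
      rw [PySem.List.pyRange_one_eq_nil (by omega)]
      simpa [show k = T.length - 1 by omega] using hinv
  | succ c ih =>
      intro k s hc hinv
      obtain ⟨hb0, hbk, hkn, hcm, hrm, hwit, hgt⟩ := hinv
      rw [PySem.List.pyRange_one_cons (by omega), List.foldl_cons]
      have hTidx : PySem.List.pyGetD T ((k : Int) + 1) 0 = T.getD (k + 1) 0 := by
        rw [show ((k : Int) + 1) = (((k + 1 : Nat)) : Int) by push_cast; ring,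
          PySem.List.pyGetD_natCast]
      have hrm' : max s.2.2 (PySem.List.pyGetD T ((k : Int) + 1) 0) = runMax T (k + 1) := by
        rw [hTidx, hrm]; rfl
      have hnext : BInv T (k + 1) (stepB T s ((k : Int) + 1)) := by
        unfold stepB
        simp only [hrm']
        by_cases hle : PySem.List.pyGetD T ((k : Int) + 1) 0 ≤ s.2.1
        · simp only [hle, if_pos]
          have htn : ((k : Int) + 1).toNat = k + 1 := by omega
          refine ⟨by omega, by omega, by omega, by rw [htn], rfl, ?_, ?_⟩
          · intro i hi
            rw [htn] at hi
            rcases Nat.lt_or_ge i s.1.toNat with hi' | hi'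
            · obtain ⟨j, h1, h2, h3⟩ := hwit i hi'
              exact ⟨j, h1, by omega, h3⟩
            · refine ⟨k + 1, by omega, by omega, ?_⟩
              rw [← hTidx]
              calc PySem.List.pyGetD T ((k : Int) + 1) 0 ≤ s.2.1 := hle
                _ = runMax T s.1.toNat := hcm
                _ ≤ runMax T i := runMax_mono T hi'
          · intro j h1 h2
            rw [htn] at h1
            omega
        · simp only [hle, if_neg, not_false_iff]
          refine ⟨hb0, by omega, by omega, hcm, rfl, hwit, ?_⟩
          intro j h1 h2
          rcases Nat.lt_or_ge j (k + 1) with hj | hj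
          · exact hgt j h1 (by omega)
          · have : j = k + 1 := by omega
            subst this
            rw [← hTidx, ← hcm]
            omega
      have hcast : ((k : Int) + 1) + 1 = (((k + 1 : Nat)) : Int) + 1 := by push_cast; ring
      rw [hcast]
      exact ih (k + 1) _ (by omega) hnext

-- ---- find? over a range: first index satisfying the predicate ----
theorem find?_pyRange_some (p : Int → Bool) (b : Int) (hb : 0 ≤ b) :
    ∀ (c : Nat) (j : Int), 0 ≤ j → j ≤ b → j + (c : Int) = m → b < m →
    (∀ i : Int, 0 ≤ i → i < b → p i = false) → p b = true →
    (PySem.List.pyRange j m 1).find? p = some b := by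
  intro c
  induction c with
  | zero =>
      intro j h0 hjb hjm hbm _ _
      omega
  | succ c ih =>
      intro j h0 hjb hjm hbm hlow hp
      rw [PySem.List.pyRange_one_cons (by omega), List.find?_cons]
      rcases eq_or_lt_of_le hjb with heq | hlt
      · subst heq
        simp [hp]
      · rw [hlow j h0 hlt]
        exact ih (j + 1) (by omega) (by omega) (by push_cast at hjm ⊢; omega) hbm hlow hp

-- the predicate of A's final loop, characterised: maxLeft[i] < minRight[i+1] ⟺ every later
-- element strictly exceeds max(T[0..i])
theorem A_pred_iff (T : List Int) (hT : T ≠ []) (i : Nat) (hi : i + 1 < T.length) :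
    (PySem.List.pyGetD (mlFold T (T.length : Int)) (i : Int) 0
        < PySem.List.pyGetD (buildMinRight T) ((i : Int) + 1) 0)
      ↔ ∀ j : Nat, i + 1 ≤ j → j < T.length → runMax T i < T.getD j 0 := by
  have hn : 1 ≤ T.length := List.length_pos_iff.mpr hT
  obtain ⟨hmlLen, hmlGet⟩ := ml_char T (T.length - 1)
  have hcast : (((T.length - 1 : Nat)) : Int) + 1 = (T.length : Int) := by omega
  rw [hcast] at hmlLen hmlGet
  have hml : PySem.List.pyGetD (mlFold T (T.length : Int)) (i : Int) 0 = runMax T i := by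
    rw [PySem.List.pyGetD_natCast]
    exact hmlGet i (by omega)
  obtain ⟨hmrLen, hmrIff⟩ := buildMinRight_inv T hT
  have hmr : PySem.List.pyGetD (buildMinRight T) ((i : Int) + 1) 0
      = (buildMinRight T).getD (i + 1) 0 := by
    rw [show ((i : Int) + 1) = (((i + 1 : Nat)) : Int) by push_cast; ring,
      PySem.List.pyGetD_natCast]
  rw [hml, hmr]
  exact hmrIff (i + 1) (by omega) hi (runMax T i)

-- ===== VERDICT (by name: the statement is the Claim_ definition above) =====
theorem solution_spec : Claim_equal_solution := by
  intro T _ hT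
  have hn : 1 ≤ T.length := List.length_pos_iff.mpr hT
  -- run B's loop invariant over the whole list
  have hx : PySem.List.pyGetD T 0 0 = runMax T 0 := by
    rw [show (0 : Int) = ((0 : Nat) : Int) by norm_num, PySem.List.pyGetD_natCast]; rfl
  have hstart : BInv T 0 (0, PySem.List.pyGetD T 0 0, PySem.List.pyGetD T 0 0) := by
    refine ⟨le_rfl, le_rfl, by omega, hx, hx, ?_, ?_⟩
    · intro i h1; simp at h1
    · intro j h1 h2; exact absurd h2 (by omega)
  have hB := B_loop T (T.length - 1) 0 _ (by omega) hstart
  rw [show ((0 : Nat) : Int) + 1 = (1 : Int) by norm_num] at hB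
  set s := (PySem.List.pyRange 1 (T.length : Int) 1).foldl (stepB T)
      (0, PySem.List.pyGetD T 0 0, PySem.List.pyGetD T 0 0) with hs
  obtain ⟨hb0, hbk, -, -, -, hwit, hgt⟩ := hB
  -- the two results
  show solution T = solution_alt T
  have hA : solution T = (PySem.List.pyRange 0 ((T.length : Int) - 1) 1).find?
      (fun i => decide (PySem.List.pyGetD (mlFold T (T.length : Int)) i 0
        < PySem.List.pyGetD (buildMinRight T) (i + 1) 0)) := rfl
  have hB : solution_alt T = (if s.1 < (T.length : Int) - 1 then some s.1 else none) := by
    rw [hs]; rfl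
  rw [hA, hB]
  have hpredFalse : ∀ i : Int, 0 ≤ i → i < s.1 →
      (decide (PySem.List.pyGetD (mlFold T (T.length : Int)) i 0
        < PySem.List.pyGetD (buildMinRight T) (i + 1) 0)) = false := by
    intro i h0 hib
    have hiNat : i = ((i.toNat : Nat) : Int) := by omega
    have hilt : i.toNat + 1 < T.length := by omega
    rw [hiNat, decide_eq_false_iff_not, A_pred_iff T hT i.toNat hilt]
    push Not
    obtain ⟨j, h1, h2, h3⟩ := hwit i.toNat (by omega)
    exact ⟨j, by omega, by omega, h3⟩
  by_cases hcase : s.1 < (T.length : Int) - 1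
  · -- B returns some s.1; A's scan hits exactly there
    rw [if_pos hcase]
    have hpredTrue : (decide (PySem.List.pyGetD (mlFold T (T.length : Int)) s.1 0
        < PySem.List.pyGetD (buildMinRight T) (s.1 + 1) 0)) = true := by
      have hbNat : s.1 = ((s.1.toNat : Nat) : Int) := by omega
      rw [hbNat, decide_eq_true_iff, A_pred_iff T hT s.1.toNat (by omega)]
      intro j h1 h2
      exact hgt j (by omega) (by omega)
    exact find?_pyRange_some _ s.1 hb0 ((T.length : Int) - 1).toNat 0 le_rfl hb0
      (by omega) hcase hpredFalse hpredTrue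
  · -- B returns none; A's predicate is false on the whole range
    rw [if_neg hcase]
    rw [List.find?_eq_none]
    intro i hi
    rw [PySem.List.mem_pyRange_one] at hi
    simp only [Bool.not_eq_true]
    exact hpredFalse i hi.1 (by omega)
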